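-- pv_equiv track=rewrite | github.com/latikamehra/PythonProjects | CommonCodingProblems/LogFileListOfStrings.py | sortStrLine
-- ===== SOURCE A (Python) =====
-- def sortStrLine(strDict):
--     sortedArr = []
--     idntfArr = list(strDict.keys())
--     strArr = list(strDict.values())
--
--     idntfArr.sort()
--     strArr.sort()
--
--     for st in strArr :
--         for idnt in idntfArr :
--             if strDict[idnt] == st :
--                 fullStr = "["+idnt+" "+st+"]"
--                 sortedArr.append(fullStr)
--                 idntfArr.remove(idnt)
--                 break
--     return sortedArr
-- ===== SOURCE B (Python) =====
-- def sortStrLine(strDict):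
--     # One sort of (value, identifier) pairs; Python's tuple order gives
--     # value-ascending with identifier-ascending tie-break, which is exactly
--     # the pairing A's quadratic scan-and-remove loop produces.
--     return ["[" + k + " " + v + "]" for v, k in sorted((v, k) for k, v in strDict.items())]
-- ===== Notes on version B (the rewrite author's own statement) =====
-- stated objective: faster
-- what changed: A sorts keys and values separately and then, for each sorted value, rescans and mutates the remaining key list to find its identifier (quadratic); B does one sort of (value, identifier) pairs, whose tuple order yields exactly A's value-ascending, identifier-tie-broken pairing, then formats each pair.
import Mathlib
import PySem

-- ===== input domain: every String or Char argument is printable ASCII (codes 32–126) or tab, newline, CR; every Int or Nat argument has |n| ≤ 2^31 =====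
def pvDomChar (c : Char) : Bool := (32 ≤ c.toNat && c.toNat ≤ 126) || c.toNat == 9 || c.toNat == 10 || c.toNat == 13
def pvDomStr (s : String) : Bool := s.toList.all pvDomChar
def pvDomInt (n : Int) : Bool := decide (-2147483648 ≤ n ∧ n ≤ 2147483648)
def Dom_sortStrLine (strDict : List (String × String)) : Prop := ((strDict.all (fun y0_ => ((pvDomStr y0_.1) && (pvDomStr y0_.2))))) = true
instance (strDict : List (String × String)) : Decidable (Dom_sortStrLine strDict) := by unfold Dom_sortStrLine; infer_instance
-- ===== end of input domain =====

-- B replaces A's quadratic sort-then-scan-and-remove pairing by ONE sort of (value, identifier)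
-- pairs in tuple order (objective: faster; a timing run measures the ports' Pythons).


-- "[" + idnt + " " + st + "]" — the identical concatenation appears verbatim in both Pythons
def pvFmt (idnt st : String) : String := PySem.Str.join "" ["[", idnt, " ", st, "]"]

-- ===== PORT A =====
-- inner 'for idnt in idntfArr: if strDict[idnt] == st: … break' — first identifier whose value is st.
-- strDict[idnt] is ported total as getD with default "": idnt always comes from strDict's keys,
-- so Python's KeyError branch is unreachable and A never raises.
def pvFindIdnt (d : PySem.Dict String String) (st : String) : List String → Option String
  | [] => none
  | i :: rest => if d.getD i "" = st then some i else pvFindIdnt d st rest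

-- outer 'for st in strArr' loop, carrying the mutated idntfArr; append on match, then remove
def pvLoopA (d : PySem.Dict String String) : List String → List String → List String
  | [], _ => []
  | st :: sts, ids =>
    match pvFindIdnt d st ids with
    | some i => pvFmt i st :: pvLoopA d sts ((PySem.List.remove? ids i).getD ids)
    | none => pvLoopA d sts ids

def sortStrLine (strDict : List (String × String)) : List String :=
  let d := PySem.Dict.ofList strDict
  let idntfArr := PySem.List.sorted d.keys (fun x => x) false
  let strArr := PySem.List.sorted d.values (fun x => x) false
  pvLoopA d strArr idntfArr

-- ===== PORT B =====
-- sorted((v, k) for k, v in strDict.items()) : one sort of swapped pairs in Python tuple order,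
-- then format each pair.
def sortStrLine_alt (strDict : List (String × String)) : List String :=
  (PySem.List.sorted2 ((PySem.Dict.ofList strDict).items.map (fun p => (p.2, p.1)))
      (fun q => q.1) (fun q => q.2) false).map (fun q => pvFmt q.2 q.1)

-- ===== PRECONDITION & SPEC =====
def Spec_sortStrLine (strDict : List (String × String)) (out : List String) : Prop := out = sortStrLine_alt strDict
instance (strDict : List (String × String)) (out : List String) : Decidable (Spec_sortStrLine strDict out) := by unfold Spec_sortStrLine; infer_instance

-- ===== CLAIM (what is proved, stated in full; the proofs are below) =====
def Claim_equal_sortStrLine : Prop := ∀ (strDict : List (String × String)), Dom_sortStrLine strDict → Spec_sortStrLine strDict (sortStrLine strDict)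

-- ===== LEMMAS AND PROOFS =====

def pvLexLE (a b : String × String) : Prop := a.1 < b.1 ∨ (a.1 = b.1 ∧ a.2 ≤ b.2)

lemma pvLexLE_trans {a b c : String × String} (h1 : pvLexLE a b) (h2 : pvLexLE b c) : pvLexLE a c := by
  unfold pvLexLE at *
  rcases h1 with h1 | ⟨e1, l1⟩ <;> rcases h2 with h2 | ⟨e2, l2⟩
  · exact Or.inl (lt_trans h1 h2)
  · exact Or.inl (e2 ▸ h1)
  · exact Or.inl (e1 ▸ h2)
  · exact Or.inr ⟨e1.trans e2, le_trans l1 l2⟩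

lemma pv_before_iff (x y : String × String) :
    (decide (x.1 < y.1) || (!decide (y.1 < x.1) && decide (x.2 < y.2))) = true ↔
      (x.1 < y.1 ∨ (x.1 = y.1 ∧ x.2 < y.2)) := by
  simp only [Bool.or_eq_true, Bool.and_eq_true, Bool.not_eq_true', decide_eq_true_eq, decide_eq_false_iff_not]
  constructor
  · rintro (h | ⟨h1, h2⟩)
    · exact Or.inl h
    · rcases lt_or_eq_of_le (le_of_not_gt h1) with h | h
      · exact Or.inl h
      · exact Or.inr ⟨h, h2⟩
  · rintro (h | ⟨h1, h2⟩)
    · exact Or.inl h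
    · exact Or.inr ⟨by rw [h1]; exact lt_irrefl _, h2⟩

lemma pv_insertBy_pairwise (x : String × String) (ys : List (String × String))
    (h : ys.Pairwise pvLexLE) :
    (PySem.List.insertBy
      (fun a b => decide (a.1 < b.1) || (!decide (b.1 < a.1) && decide (a.2 < b.2))) x ys).Pairwise pvLexLE := by
  induction ys with
  | nil => simp [PySem.List.insertBy]
  | cons y ys ih =>
    rw [PySem.List.insertBy.eq_2]
    rcases h with _ | ⟨hy, hys⟩
    by_cases hb : (decide (x.1 < y.1) || (!decide (y.1 < x.1) && decide (x.2 < y.2))) = true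
    · simp only [hb, if_pos]
      have hxy : pvLexLE x y := by
        rcases (pv_before_iff x y).mp hb with h | ⟨h1, h2⟩
        · exact Or.inl h
        · exact Or.inr ⟨h1, le_of_lt h2⟩
      refine List.Pairwise.cons ?_ (List.Pairwise.cons hy hys)
      intro z hz
      rcases List.mem_cons.mp hz with rfl | hz
      · exact hxy
      · exact pvLexLE_trans hxy (hy _ hz)
    · simp only [hb, if_neg, Bool.not_eq_true]
      have hyx : pvLexLE y x := by
        rw [pv_before_iff] at hb
        push Not at hb
        rcases lt_or_eq_of_le (le_of_not_gt hb.1) with h | h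
        · exact Or.inl h
        · exact Or.inr ⟨h, le_of_not_gt (hb.2 h.symm)⟩
      refine List.Pairwise.cons ?_ (ih hys)
      intro z hz
      rw [PySem.List.insertBy_mem_iff] at hz
      rcases hz with rfl | hz
      · exact hyx
      · exact hy _ hz

lemma pv_foldl_insertBy_pairwise (xs : List (String × String)) :
    ∀ acc : List (String × String), acc.Pairwise pvLexLE →
    (xs.foldl (fun acc x => PySem.List.insertBy
      (fun a b => decide (a.1 < b.1) || (!decide (b.1 < a.1) && decide (a.2 < b.2))) x acc) acc).Pairwise pvLexLE := by
  induction xs with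
  | nil => intro acc h; exact h
  | cons x xs ih => intro acc h; exact ih _ (pv_insertBy_pairwise x acc h)

lemma pv_sorted2_pairwise (xs : List (String × String)) :
    (PySem.List.sorted2 xs (fun q => q.1) (fun q => q.2) false).Pairwise pvLexLE := by
  simp only [PySem.List.sorted2]
  simpa using pv_foldl_insertBy_pairwise xs [] (List.Pairwise.nil)

def pvLexLT (a b : String × String) : Prop := a.1 < b.1 ∨ (a.1 = b.1 ∧ a.2 < b.2)

lemma pv_find_first (d : PySem.Dict String String) (v : String) :
    ∀ (K : List String) (k : String), K.Pairwise (· < ·) → k ∈ K → d.getD k "" = v →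
    (∀ k' ∈ K, d.getD k' "" = v → k ≤ k') →
    pvFindIdnt d v K = some k := by
  intro K
  induction K with
  | nil => intro k _ hk; exact absurd hk (List.not_mem_nil)
  | cons h t ih =>
    intro k hp hk hv hmin
    rcases hp with _ | ⟨hh, ht⟩
    by_cases hhv : d.getD h "" = v
    · have h1 : k ≤ h := hmin h (List.mem_cons_self) hhv
      have h2 : h ≤ k := by
        rcases List.mem_cons.mp hk with rfl | hk'
        · exact le_refl _
        · exact le_of_lt (hh _ hk')
      have heq : h = k := le_antisymm h2 h1
      subst heq
      simp [pvFindIdnt, hhv]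
    · have hk' : k ∈ t := by
        rcases List.mem_cons.mp hk with rfl | hk'
        · exact absurd hv hhv
        · exact hk'
      simp only [pvFindIdnt, hhv, if_false]
      exact ih k ht hk' hv (fun k' hk'' => hmin k' (List.mem_cons_of_mem _ hk''))

lemma pv_loop_eq (d : PySem.Dict String String) :
    ∀ (Q : List (String × String)) (K : List String),
    Q.Pairwise pvLexLT → K.Pairwise (· < ·) → K.Perm (Q.map Prod.snd) →
    (∀ q ∈ Q, d.getD q.2 "" = q.1) →
    pvLoopA d (Q.map Prod.fst) K = Q.map (fun q => pvFmt q.2 q.1) := by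
  intro Q
  induction Q with
  | nil =>
    intro K _ _ hperm _
    have : K = [] := List.Perm.eq_nil (by simpa using hperm)
    subst this
    rfl
  | cons q Q' ih =>
    obtain ⟨v, k⟩ := q
    intro K hQ hK hperm hcons
    rcases hQ with _ | ⟨hq, hQ'⟩
    have hkK : k ∈ K := hperm.mem_iff.mpr (by simp)
    have hvk : d.getD k "" = v := hcons _ (List.mem_cons_self)
    have hmin : ∀ k' ∈ K, d.getD k' "" = v → k ≤ k' := by
      intro k' hk' hv'
      have : k' ∈ k :: Q'.map Prod.snd := by simpa using hperm.mem_iff.mp hk'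
      rcases List.mem_cons.mp this with rfl | hmem
      · exact le_refl _
      · obtain ⟨q', hq'Q, hq'2⟩ := List.mem_map.mp hmem
        have hval : q'.1 = v := by
          rw [← hcons q' (List.mem_cons_of_mem _ hq'Q), hq'2, hv']
        rcases hq q' hq'Q with h | ⟨_, h⟩
        · exact absurd (hval ▸ h) (lt_irrefl v)
        · exact le_of_lt (hq'2 ▸ h)
    have hfind : pvFindIdnt d v K = some k := pv_find_first d v K k hK hkK hvk hmin
    have hrem : PySem.List.remove? K k = some (K.erase k) := PySem.List.remove?_eq_some_erase K k hkK
    have herase_perm : (K.erase k).Perm (Q'.map Prod.snd) := by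
      have := hperm.erase k
      simpa [List.erase_cons_head] using this
    simp only [List.map, pvLoopA, hfind, hrem, Option.getD_some]
    rw [ih (K.erase k) hQ' (hK.sublist (List.erase_sublist)) herase_perm
        (fun q hq'' => hcons q (List.mem_cons_of_mem _ hq''))]

theorem pv_main (strDict : List (String × String)) :
    sortStrLine strDict = sortStrLine_alt strDict := by
  unfold sortStrLine sortStrLine_alt
  set d := PySem.Dict.ofList strDict with hd
  set L := d.items with hL
  set Lsw := L.map (fun p : String × String => (p.2, p.1)) with hLsw
  set Q := PySem.List.sorted2 Lsw (fun q => q.1) (fun q => q.2) false with hQ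
  have hkeys : d.keys = L.map Prod.fst := by simp [PySem.Dict.keys, hL]
  have hvals : d.values = L.map Prod.snd := by simp [PySem.Dict.values, hL]
  have hnd : (L.map Prod.fst).Nodup := by rw [← hkeys]; exact PySem.Dict.nodup_keys_ofList strDict
  have hQperm : Q.Perm Lsw := PySem.List.sorted2_perm Lsw _ _ false
  have hQsndLsw : Lsw.map Prod.snd = L.map Prod.fst := by
    simp [hLsw, List.map_map, Function.comp]
  have hQfstLsw : Lsw.map Prod.fst = L.map Prod.snd := by
    simp [hLsw, List.map_map, Function.comp]
  have hQsnd_perm : (Q.map Prod.snd).Perm (L.map Prod.fst) := by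
    rw [← hQsndLsw]; exact hQperm.map _
  have hQLE := pv_sorted2_pairwise Lsw
  have hQsnd_nodup : (Q.map Prod.snd).Nodup := (hQsnd_perm.nodup_iff).mpr hnd
  have hQsnd_ne : Q.Pairwise (fun a b : String × String => a.2 ≠ b.2) :=
    List.pairwise_map.mp hQsnd_nodup
  have hQLT : Q.Pairwise pvLexLT := by
    refine ((hQLE.and hQsnd_ne).imp ?_)
    rintro a b ⟨hle, hne⟩
    rcases hle with h | ⟨h1, h2⟩
    · exact Or.inl h
    · exact Or.inr ⟨h1, lt_of_le_of_ne h2 hne⟩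
  -- keys side
  set K := PySem.List.sorted d.keys (fun x => x) false with hK
  have hKperm_keys : K.Perm d.keys := PySem.List.sorted_perm d.keys _ false
  have hKle : K.Pairwise (fun a b : String => a ≤ b) := PySem.List.sorted_pairwise d.keys _
  have hKnodup : K.Nodup := hKperm_keys.nodup_iff.mpr (by rw [hkeys]; exact hnd)
  have hKlt : K.Pairwise (· < ·) := by
    refine ((hKle.and hKnodup).imp ?_)
    rintro a b ⟨hle, hne⟩
    exact lt_of_le_of_ne hle hne
  have hKperm : K.Perm (Q.map Prod.snd) := by
    refine (hKperm_keys.trans ?_).trans hQsnd_perm.symm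
    rw [hkeys]
  have hcons : ∀ q ∈ Q, d.getD q.2 "" = q.1 := by
    intro q hq
    have : q ∈ Lsw := hQperm.mem_iff.mp hq
    obtain ⟨p, hpL, hpq⟩ := List.mem_map.mp this
    subst hpq
    exact PySem.Dict.getD_of_mem_items d hpL (by rw [hkeys]; exact hnd) ""
  have hvalsQ : PySem.List.sorted d.values (fun x => x) false = Q.map Prod.fst := by
    apply PySem.List.sorted_id_eq_of_perm_of_pairwise
    · rw [hvals, ← hQfstLsw]; exact hQperm.map _
    · refine List.pairwise_map.mpr (hQLE.imp ?_)
      rintro a b (h | ⟨h1, _⟩)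
      · exact le_of_lt h
      · exact le_of_eq h1
  show pvLoopA d (PySem.List.sorted d.values (fun x => x) false) K = List.map (fun q => pvFmt q.2 q.1) Q
  rw [hvalsQ]
  exact pv_loop_eq d Q K hQLT hKlt hKperm hcons


-- ===== VERDICT (by name: the statement is the Claim_ definition above) =====
theorem sortStrLine_spec : Claim_equal_sortStrLine := by
  intro strDict _
  unfold Spec_sortStrLine
  exact pv_main strDict
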